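-- pv_equiv track=rewrite | github.com/Atyors/Yams | modules/main.py | place_casses
-- ===== SOURCE A (Python) =====
-- def place_casses(val_cassees, pos_casse):
--     des_casses = [0, 0, 0, 0, 0]
--     for elem in val_cassees:
--         if elem == 1 and pos_casse[0] == 1:
--             des_casses[0] = 1
--         if elem == 2 and pos_casse[1] == 1:
--             des_casses[1] = 1
--         if elem == 3 and pos_casse[2] == 1:
--             des_casses[2] = 1
--         if elem == 4 and pos_casse[3] == 1:
--             des_casses[3] = 1
--         if elem == 5 and pos_casse[4] == 1:
--             des_casses[4] = 1
--     return des_casses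
-- ===== SOURCE B (Python) =====
-- def place_casses(val_cassees, pos_casse):
--     present = set(val_cassees)
--     return [1 if (i + 1) in present and pos_casse[i] == 1 else 0 for i in range(5)]
-- ===== Notes on version B (the rewrite author's own statement) =====
-- stated objective: idiomatic
-- what changed: Replaces A's five hard-coded per-die branches inside the scan of val_cassees by one precomputed set of present faces and a single comprehension over the five positions.
import Mathlib
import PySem

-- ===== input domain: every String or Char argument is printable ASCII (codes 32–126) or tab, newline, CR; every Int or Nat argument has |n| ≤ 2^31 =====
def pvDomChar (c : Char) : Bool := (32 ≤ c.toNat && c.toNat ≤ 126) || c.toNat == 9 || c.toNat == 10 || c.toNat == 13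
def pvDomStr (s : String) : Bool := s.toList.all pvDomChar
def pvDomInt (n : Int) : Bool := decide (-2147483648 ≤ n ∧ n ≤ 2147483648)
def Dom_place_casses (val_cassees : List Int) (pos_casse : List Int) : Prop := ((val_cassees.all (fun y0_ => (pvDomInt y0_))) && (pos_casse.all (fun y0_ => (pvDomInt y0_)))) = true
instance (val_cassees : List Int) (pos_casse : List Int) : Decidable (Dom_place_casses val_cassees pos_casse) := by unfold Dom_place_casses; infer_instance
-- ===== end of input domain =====

-- B replaces A's per-die five-branch scan by one precomputed set of present faces and a single
-- comprehension over the five positions (idiomatic/simpler; same cost on 5-position data).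

-- ===== PORT A =====
-- A mutates a 5-slot list des_casses while scanning val_cassees; the five slots are the
-- components of the fold state.  pos_casse[i] is ported as pyGetD (exact under Pre_).
def placeStep (pos_casse : List Int) (d : Int × Int × Int × Int × Int) (elem : Int) :
    Int × Int × Int × Int × Int :=
  ((if elem = 1 ∧ PySem.List.pyGetD pos_casse 0 0 = 1 then 1 else d.1),
   (if elem = 2 ∧ PySem.List.pyGetD pos_casse 1 0 = 1 then 1 else d.2.1),
   (if elem = 3 ∧ PySem.List.pyGetD pos_casse 2 0 = 1 then 1 else d.2.2.1),
   (if elem = 4 ∧ PySem.List.pyGetD pos_casse 3 0 = 1 then 1 else d.2.2.2.1),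
   (if elem = 5 ∧ PySem.List.pyGetD pos_casse 4 0 = 1 then 1 else d.2.2.2.2))

def place_casses (val_cassees : List Int) (pos_casse : List Int) : List Int :=
  let d := val_cassees.foldl (placeStep pos_casse) (0, 0, 0, 0, 0)
  [d.1, d.2.1, d.2.2.1, d.2.2.2.1, d.2.2.2.2]

-- ===== PORT B =====
def place_casses_alt (val_cassees : List Int) (pos_casse : List Int) : List Int :=
  let present : PySem.Set Int := PySem.Set.ofList val_cassees
  (PySem.List.pyRange 0 5 1).map (fun i =>
    if (i + 1) ∈ present ∧ PySem.List.pyGetD pos_casse i 0 = 1 then 1 else 0)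

-- ===== PRECONDITION & SPEC =====
-- A (and B) raise IndexError when a face f ∈ {1..5} occurs in val_cassees but pos_casse has
-- fewer than f entries; Pre_ excludes exactly those inputs.
def Pre_place_casses (val_cassees : List Int) (pos_casse : List Int) : Prop :=
  ∀ j ∈ [0, 1, 2, 3, 4], ((j : Int) + 1) ∈ val_cassees → j < pos_casse.length

instance (val_cassees : List Int) (pos_casse : List Int) : Decidable (Pre_place_casses val_cassees pos_casse) := by
  unfold Pre_place_casses; infer_instance

def pvWitness_place_casses : List Int × List Int := ([3, 1, 3, 6], [1, 0, 1, 1, 0])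

def Spec_place_casses (val_cassees : List Int) (pos_casse : List Int) (out : List Int) : Prop := out = place_casses_alt val_cassees pos_casse
instance (val_cassees : List Int) (pos_casse : List Int) (out : List Int) : Decidable (Spec_place_casses val_cassees pos_casse out) := by unfold Spec_place_casses; infer_instance

-- ===== CLAIM (what is proved, stated in full; the proofs are below) =====
def Claim_equal_place_casses : Prop := ∀ (val_cassees : List Int) (pos_casse : List Int), Dom_place_casses val_cassees pos_casse → Pre_place_casses val_cassees pos_casse → Spec_place_casses val_cassees pos_casse (place_casses val_cassees pos_casse)

-- ===== LEMMAS AND PROOFS =====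

-- Characterisation of A's fold: slot j ends up 1 iff face j+1 occurs and pos_casse[j] == 1.
theorem placeFold_char (pos_casse : List Int) (l : List Int) (d : Int × Int × Int × Int × Int) :
    l.foldl (placeStep pos_casse) d =
      ((if (1 : Int) ∈ l ∧ PySem.List.pyGetD pos_casse 0 0 = 1 then 1 else d.1),
       (if (2 : Int) ∈ l ∧ PySem.List.pyGetD pos_casse 1 0 = 1 then 1 else d.2.1),
       (if (3 : Int) ∈ l ∧ PySem.List.pyGetD pos_casse 2 0 = 1 then 1 else d.2.2.1),
       (if (4 : Int) ∈ l ∧ PySem.List.pyGetD pos_casse 3 0 = 1 then 1 else d.2.2.2.1),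
       (if (5 : Int) ∈ l ∧ PySem.List.pyGetD pos_casse 4 0 = 1 then 1 else d.2.2.2.2)) := by
  induction l generalizing d with
  | nil => simp
  | cons a l ih =>
    rw [List.foldl_cons, ih]
    simp only [placeStep, List.mem_cons, Prod.mk.injEq]
    refine ⟨?_, ?_, ?_, ?_, ?_⟩ <;> (split_ifs <;> simp_all <;> omega)

-- ===== VERDICT (by name: the statement is the Claim_ definition above) =====
theorem place_casses_spec : Claim_equal_place_casses := by
  intro v p _ _
  unfold Spec_place_casses place_casses place_casses_alt
  rw [placeFold_char]
  simp only [PySem.List.pyRange, show Int.toNat 5 = 5 from rfl]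
  simp [List.range_succ, PySem.Set.mem_ofList]
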